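-- pv_equiv track=rewrite | github.com/shetsecure/ocean-hiring-agent | backend/interview_manager.py | _generate_candidate_id
-- ===== SOURCE A (Python) =====
-- def _generate_candidate_id(name: str, position: str) -> str:
--     """Generate a candidate ID from name and position."""
--     # Simple ID generation: first letters of names + position abbreviation
--     name_parts = name.split()
--     initials = "".join([part[0].upper() for part in name_parts if part])
--
--     # Position abbreviation
--     if "software" in position.lower() or "engineer" in position.lower():
--         pos_abbrev = "SE"
--     elif "data" in position.lower():
--         pos_abbrev = "DS"
--     elif "product" in position.lower():
--         pos_abbrev = "PM"
--     elif "design" in position.lower():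
--         pos_abbrev = "DES"
--     else:
--         pos_abbrev = "GEN"
--
--     return f"{pos_abbrev}{initials}"
-- ===== SOURCE B (Python) =====
-- # Different algorithm: initials via one char-level scan with a word-boundary flag
-- # (no split), and the position abbreviation via a single sliding-window pass that
-- # collects every matching keyword's abbreviation into a set, then a priority lookup.
-- _KEYWORDS = [("software", "SE"), ("engineer", "SE"), ("data", "DS"),
--              ("product", "PM"), ("design", "DES")]
-- _PRIORITY = ["SE", "DS", "PM", "DES"]
--
--
-- def _generate_candidate_id(name: str, position: str) -> str:
--     initials = []
--     boundary = True
--     for ch in name: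
--         if ch.isspace():
--             boundary = True
--         else:
--             if boundary:
--                 initials.append(ch.upper())
--             boundary = False
--
--     pos = position.lower()
--     found = set()
--     for i in range(len(pos)):
--         for kw, ab in _KEYWORDS:
--             if pos[i:i + len(kw)] == kw:
--                 found.add(ab)
--
--     for ab in _PRIORITY:
--         if ab in found:
--             return ab + "".join(initials)
--     return "GEN" + "".join(initials)
-- ===== Notes on version B (the rewrite author's own statement) =====
-- stated objective: alternative
-- what changed: Initials come from one character-level scan of the name with a word-boundary flag instead of split-then-index, and the position abbreviation comes from a single sliding-window pass that collects every matching keyword's abbreviation into a set followed by a priority lookup, instead of per-keyword substring tests in an if/elif chain.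
import Mathlib
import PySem

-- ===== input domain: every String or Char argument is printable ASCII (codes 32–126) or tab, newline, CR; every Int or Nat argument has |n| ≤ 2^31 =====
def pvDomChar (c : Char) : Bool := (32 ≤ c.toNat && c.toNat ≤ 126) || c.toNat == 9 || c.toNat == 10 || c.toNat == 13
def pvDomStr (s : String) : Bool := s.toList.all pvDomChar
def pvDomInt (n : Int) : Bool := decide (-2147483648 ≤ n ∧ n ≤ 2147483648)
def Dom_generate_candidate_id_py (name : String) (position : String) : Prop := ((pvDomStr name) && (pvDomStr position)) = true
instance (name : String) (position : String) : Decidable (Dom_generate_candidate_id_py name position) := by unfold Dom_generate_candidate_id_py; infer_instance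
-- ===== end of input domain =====

-- B computes the initials in one character-level scan with a word-boundary flag (no
-- split) and the position abbreviation by one sliding-window pass collecting matching
-- keywords' abbreviations into a set, then a priority lookup (alternative algorithm).

-- ===== PORT A =====
-- literal port of A; 'part[0]' is guarded by the 'if part' filter, so the none branch
-- of pyGet? (Python's IndexError) is unreachable and A is total
def generate_candidate_id_py (name : String) (position : String) : String :=
  let name_parts := PySem.Str.split₀ name
  let initials := PySem.Str.join "" ((name_parts.filter (fun part => part ≠ "")).map
      (fun part =>
        match PySem.List.pyGet? part.toList 0 with
        | some c => PySem.Str.upper (String.ofList [c])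
        | none => ""))
  let pos_abbrev :=
    if PySem.Str.isIn "software" (PySem.Str.lower position)
        || PySem.Str.isIn "engineer" (PySem.Str.lower position) then "SE"
    else if PySem.Str.isIn "data" (PySem.Str.lower position) then "DS"
    else if PySem.Str.isIn "product" (PySem.Str.lower position) then "PM"
    else if PySem.Str.isIn "design" (PySem.Str.lower position) then "DES"
    else "GEN"
  pos_abbrev ++ initials

-- ===== PORT B =====
def pvKeywords : List (List Char × String) :=
  [("software".toList, "SE"), ("engineer".toList, "SE"), ("data".toList, "DS"),
   ("product".toList, "PM"), ("design".toList, "DES")]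

def pvPriority : List String := ["SE", "DS", "PM", "DES"]

-- 'for ab in _PRIORITY: if ab in found: return …' / final 'return "GEN" + …'
def pvFirstIn (found : PySem.Set String) : List String → String
  | [] => "GEN"
  | ab :: rest => if ab ∈ found then ab else pvFirstIn found rest

def generate_candidate_id_py_alt (name : String) (position : String) : String :=
  -- the char loop: state = (accumulated initials, boundary flag); 'ch.upper()' on a
  -- single char is exactly upperChar (chars are 1-codepoint, upper of one ASCII char)
  let initials := (name.toList.foldl
      (fun (st : List Char × Bool) ch =>
        if PySem.Chars.isspace ch then (st.1, true)
        else ((if st.2 then st.1 ++ [PySem.Chars.upperChar ch] else st.1), false))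
      ([], true)).1
  let pos := PySem.Chars.lower position.toList
  let found := (PySem.List.pyRange 0 pos.length).foldl
      (fun s i => pvKeywords.foldl
        (fun s p =>
          if PySem.List.slice pos (some i) (some (i + p.1.length)) = p.1
          then PySem.Set.add s p.2 else s) s)
      PySem.Set.empty
  pvFirstIn found pvPriority ++ String.ofList initials

-- ===== PRECONDITION & SPEC =====
def Spec_generate_candidate_id_py (name : String) (position : String) (out : String) : Prop := out = generate_candidate_id_py_alt name position
instance (name : String) (position : String) (out : String) : Decidable (Spec_generate_candidate_id_py name position out) := by unfold Spec_generate_candidate_id_py; infer_instance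

-- ===== CLAIM (what is proved, stated in full; the proofs are below) =====
def Claim_equal_generate_candidate_id_py : Prop := ∀ (name : String) (position : String), Dom_generate_candidate_id_py name position → Spec_generate_candidate_id_py name position (generate_candidate_id_py name position)

-- ===== LEMMAS AND PROOFS =====

-- the word-start chars of cs when the scanner starts at boundary state b
def pvHeads : List Char → Bool → List Char
  | [], _ => []
  | c :: rest, b =>
    if PySem.Chars.isspace c then pvHeads rest true
    else (if b then [c] else []) ++ pvHeads rest false

theorem pv_foldl_scan (cs : List Char) (acc : List Char) (b : Bool) :
    (cs.foldl
      (fun (st : List Char × Bool) ch =>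
        if PySem.Chars.isspace ch then (st.1, true)
        else ((if st.2 then st.1 ++ [PySem.Chars.upperChar ch] else st.1), false))
      (acc, b)).1 = acc ++ PySem.Chars.upper (pvHeads cs b) := by
  induction cs generalizing acc b with
  | nil => simp [pvHeads, PySem.Chars.upper]
  | cons c rest ih =>
    simp only [List.foldl_cons, pvHeads]
    by_cases hs : PySem.Chars.isspace c = true
    · simp [hs, ih]
    · simp only [Bool.not_eq_true] at hs
      cases b <;> simp [hs, ih, PySem.Chars.upper]

theorem pv_go_append (cs : List Char) (cur : List Char) (acc : List (List Char)) :
    PySem.Chars.split₀.go cs cur acc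
      = acc.reverse ++ PySem.Chars.split₀.go cs cur [] := by
  induction cs generalizing cur acc with
  | nil =>
    by_cases h : cur.isEmpty <;> simp [PySem.Chars.split₀.go, h]
  | cons c rest ih =>
    by_cases hs : PySem.Chars.isspace c
    · by_cases h : cur.isEmpty
      · simp only [PySem.Chars.split₀.go, hs, h, if_true]
        exact ih [] acc
      · simp only [PySem.Chars.split₀.go, hs, h, if_true, if_false, Bool.false_eq_true]
        rw [ih [] (cur.reverse :: acc), ih [] [cur.reverse]]
        simp
    · simp only [PySem.Chars.split₀.go, hs, if_false, Bool.false_eq_true]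
      exact ih (c :: cur) acc

theorem pv_go_heads (cs : List Char) (cur : List Char) :
    ((PySem.Chars.split₀.go cs cur []).map (fun p => p.take 1)).flatten
      = cur.reverse.take 1 ++ pvHeads cs cur.isEmpty := by
  induction cs generalizing cur with
  | nil =>
    by_cases h : cur.isEmpty
    · simp_all [PySem.Chars.split₀.go, List.isEmpty_iff, pvHeads]
    · simp [PySem.Chars.split₀.go, h, pvHeads]
  | cons c rest ih =>
    by_cases hs : PySem.Chars.isspace c
    · by_cases h : cur.isEmpty
      · simp_all [PySem.Chars.split₀.go, pvHeads, List.isEmpty_iff]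
      · simp only [PySem.Chars.split₀.go, hs, h, if_true, if_false, Bool.false_eq_true,
          pvHeads]
        rw [pv_go_append rest [] [cur.reverse]]
        have := ih ([] : List Char)
        simp only [List.isEmpty_nil, List.reverse_nil, List.take_nil,
          List.nil_append] at this
        simp [this]
    · simp only [PySem.Chars.split₀.go, hs, if_false, Bool.false_eq_true, pvHeads]
      rw [ih (c :: cur)]
      by_cases h : cur.isEmpty
      · have : cur = [] := List.isEmpty_iff.mp h
        simp [this]
      · have : cur.reverse ≠ [] := by
          simp [List.isEmpty_iff] at h; simpa using h
        simp only [h, if_false, Bool.false_eq_true, List.isEmpty_cons,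
          List.reverse_cons]
        rw [List.take_append_of_le_length (by
          cases hcr : cur.reverse with
          | nil => exact absurd hcr this
          | cons _ _ => simp)]
        simp

-- A's initials string, char level: it equals upper of word-start chars of the name
theorem pv_initials_chars (ps : List (List Char)) :
    ((ps.filter (fun p => p ≠ [])).map
        (fun p => match PySem.List.pyGet? p 0 with
          | some c => PySem.Chars.upper [c]
          | none => [])).flatten
      = (ps.map (fun p => PySem.Chars.upper (p.take 1))).flatten := by
  induction ps with
  | nil => simp
  | cons p ps ih =>
    cases p with
    | nil => simpa [PySem.Chars.upper] using ih
    | cons c t =>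
      simp only [List.filter_cons, decide_not, List.map_cons, List.flatten_cons,
        List.take_succ_cons, List.take_zero] at ih ⊢
      rw [if_pos (by simp), List.map_cons, List.flatten_cons, ih,
        show PySem.List.pyGet? (c :: t) 0 = some c by
          simp [PySem.List.pyGet?, PySem.List.pyIdx?]]

theorem pv_join_empty (ls : List (List Char)) :
    PySem.Chars.join [] ls = ls.flatten := by
  induction ls with
  | nil => simp [PySem.Chars.join, List.intercalate]
  | cons p ls ih =>
    cases ls with
    | nil => simp [PySem.Chars.join_singleton]
    | cons q r => rw [PySem.Chars.join_cons_cons]; simp [ih]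

theorem pv_toList_eq_nil (part : String) : (part = "") ↔ (part.toList = []) := by
  rw [show ([] : List Char) = ("" : String).toList from rfl]
  exact String.toList_inj.symm

theorem pv_map_toList (g : List Char → List Char) (l : List String) :
    l.map (fun w => g w.toList) = (l.map String.toList).map g := by
  simp [List.map_map, Function.comp_def]

theorem pv_filter_toList (l : List String) :
    ((l.filter (fun w => decide (w.toList ≠ []))).map String.toList)
      = (l.map String.toList).filter (fun q => decide (q ≠ [])) := by
  rw [List.filter_map]
  simp [Function.comp_def]

-- the initials of A (filtered heads of split words) equal B's boundary-flag scan
theorem pv_initials_eq (name : String) :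
    (PySem.Str.join "" (((PySem.Str.split₀ name).filter (fun part => part ≠ "")).map
      (fun part =>
        match PySem.List.pyGet? part.toList 0 with
        | some c => PySem.Str.upper (String.ofList [c])
        | none => ""))).toList
    = PySem.Chars.upper (pvHeads name.toList true) := by
  simp only [PySem.Str.toList_join, List.map_map, Function.comp_def]
  rw [show ("" : String).toList = [] from rfl, pv_join_empty]
  have h1 : (fun part : String =>
      (match PySem.List.pyGet? part.toList 0 with
        | some c => PySem.Str.upper (String.ofList [c])
        | none => ("" : String)).toList)
      = (fun part : String =>
          match PySem.List.pyGet? part.toList 0 with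
          | some c => PySem.Chars.upper [c]
          | none => []) := by
    funext part
    cases PySem.List.pyGet? part.toList 0 <;> simp [PySem.Str.toList_upper]
  have h2 : (fun part : String => decide (part ≠ ""))
      = fun part => decide (part.toList ≠ []) := by
    funext part
    simp only [ne_eq, decide_eq_decide, not_iff_not]
    exact pv_toList_eq_nil part
  rw [h1, h2,
    pv_map_toList (fun q => match PySem.List.pyGet? q 0 with
      | some c => PySem.Chars.upper [c]
      | none => []),
    pv_filter_toList, PySem.Str.split₀_map_toList, pv_initials_chars]
  have h3 : (fun q : List Char => PySem.Chars.upper (q.take 1))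
      = fun q : List Char => PySem.Chars.upper (q.take 1) := rfl
  have := pv_go_heads name.toList []
  simp only [List.isEmpty_nil, List.reverse_nil, List.take_nil, List.nil_append] at this
  calc ((PySem.Chars.split₀ name.toList).map
          (fun p => PySem.Chars.upper (p.take 1))).flatten
      = PySem.Chars.upper (((PySem.Chars.split₀ name.toList).map
          (fun p => p.take 1)).flatten) := by
        simp [PySem.Chars.upper, List.map_flatten, List.map_map, Function.comp_def]
    _ = PySem.Chars.upper (pvHeads name.toList true) := by
        rw [show PySem.Chars.split₀ name.toList
              = PySem.Chars.split₀.go name.toList [] [] from rfl, this]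

-- membership in the inner keyword fold
theorem pv_mem_inner (kws : List (List Char × String)) (s : PySem.Set String)
    (pos : List Char) (i : Int) (x : String) :
    (x ∈ kws.foldl
      (fun s p =>
        if PySem.List.slice pos (some i) (some (i + p.1.length)) = p.1
        then PySem.Set.add s p.2 else s) s)
    ↔ x ∈ s ∨ ∃ p ∈ kws,
        PySem.List.slice pos (some i) (some (i + p.1.length)) = p.1 ∧ p.2 = x := by
  induction kws generalizing s with
  | nil => simp
  | cons q kws ih =>
    simp only [List.foldl_cons, List.mem_cons]
    by_cases h : PySem.List.slice pos (some i) (some (i + q.1.length)) = q.1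
    · rw [if_pos h, ih]
      simp only [PySem.Set.mem_add]
      constructor
      · rintro (⟨hs | hx⟩ | ⟨p, hp, hc, he⟩)
        · exact Or.inl hs
        · exact Or.inr ⟨q, Or.inl rfl, h, hx.symm⟩
        · exact Or.inr ⟨p, Or.inr hp, hc, he⟩
      · rintro (hs | ⟨p, hp | hp, hc, he⟩)
        · exact Or.inl (Or.inl hs)
        · exact Or.inl (Or.inr (by rw [hp] at he; exact he.symm))
        · exact Or.inr ⟨p, hp, hc, he⟩
    · rw [if_neg h, ih]
      constructor
      · rintro (hs | ⟨p, hp, hc, he⟩)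
        · exact Or.inl hs
        · exact Or.inr ⟨p, Or.inr hp, hc, he⟩
      · rintro (hs | ⟨p, hp | hp, hc, he⟩)
        · exact Or.inl hs
        · exact absurd (by rw [hp] at hc; exact hc) h
        · exact Or.inr ⟨p, hp, hc, he⟩

-- membership in the outer window fold
theorem pv_mem_found (pos : List Char) (l : List Int) (s : PySem.Set String) (x : String) :
    (x ∈ l.foldl
      (fun s i => pvKeywords.foldl
        (fun s p =>
          if PySem.List.slice pos (some i) (some (i + p.1.length)) = p.1
          then PySem.Set.add s p.2 else s) s) s)
    ↔ x ∈ s ∨ ∃ i ∈ l, ∃ p ∈ pvKeywords,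
        PySem.List.slice pos (some i) (some (i + p.1.length)) = p.1 ∧ p.2 = x := by
  induction l generalizing s with
  | nil => simp
  | cons j l ih =>
    simp only [List.foldl_cons, List.mem_cons]
    rw [ih, pv_mem_inner]
    constructor
    · rintro (⟨hs | ⟨p, hp, hc, he⟩⟩ | ⟨i, hi, hrest⟩)
      · exact Or.inl hs
      · exact Or.inr ⟨j, Or.inl rfl, p, hp, hc, he⟩
      · exact Or.inr ⟨i, Or.inr hi, hrest⟩
    · rintro (hs | ⟨i, hi | hi, hrest⟩)
      · exact Or.inl (Or.inl hs)
      · exact Or.inl (Or.inr (hi ▸ hrest))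
      · exact Or.inr ⟨i, hi, hrest⟩

-- window equality at i is exactly 'kw is a prefix of pos.drop i'
theorem pv_slice_eq_prefix (pos kw : List Char) (i : Int) (h0 : 0 ≤ i)
    (hl : i < (pos.length : Int)) :
    PySem.List.slice pos (some i) (some (i + kw.length)) = kw
      ↔ kw <+: pos.drop i.toNat := by
  have hi : PySem.List.clampIdx pos.length i = i.toNat := by
    unfold PySem.List.clampIdx
    split_ifs <;> omega
  have hb : PySem.List.clampIdx pos.length (i + kw.length)
      = min (i.toNat + kw.length) pos.length := by
    unfold PySem.List.clampIdx
    split_ifs <;> omega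
  simp only [PySem.List.slice, hi, hb]
  by_cases hc : i.toNat + kw.length ≤ pos.length
  · rw [min_eq_left hc, Nat.add_sub_cancel_left]
    rw [List.prefix_iff_eq_take]
    constructor
    · intro he; exact he.symm
    · intro he; exact he.symm
  · rw [min_eq_right (by omega)]
    have hdl : (pos.drop i.toNat).length = pos.length - i.toNat := by simp
    have htake : (pos.drop i.toNat).take (pos.length - i.toNat) = pos.drop i.toNat := by
      rw [← hdl]; exact List.take_length
    rw [htake]
    constructor
    · intro he
      exfalso
      have : (pos.drop i.toNat).length = kw.length := by rw [he]
      omega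
    · intro hpre
      exfalso
      have := hpre.length_le
      omega

-- occurrence at some window of the scan ↔ Python's 'kw in pos' (kw nonempty)
theorem pv_found_iff_isIn (pos kw : List Char) (hkw : kw ≠ []) :
    (∃ i ∈ PySem.List.pyRange 0 pos.length,
        PySem.List.slice pos (some i) (some (i + kw.length)) = kw)
      ↔ PySem.Chars.isIn kw pos = true := by
  rw [← PySem.Chars.exists_prefix_drop_iff_isIn]
  constructor
  · rintro ⟨i, hi, hc⟩
    rw [PySem.List.mem_pyRange_one] at hi
    exact ⟨i.toNat, (pv_slice_eq_prefix pos kw i hi.1 hi.2).mp hc⟩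
  · rintro ⟨j, hj⟩
    have hjl : j < pos.length := by
      by_contra h
      rw [List.drop_eq_nil_of_le (by omega)] at hj
      exact hkw (List.prefix_nil.mp hj)
    refine ⟨(j : Int), PySem.List.mem_pyRange_one.mpr (by omega), ?_⟩
    rw [pv_slice_eq_prefix pos kw j (by omega) (by omega)]
    simpa using hj

-- ===== VERDICT (by name: the statement is the Claim_ definition above) =====
set_option maxHeartbeats 2000000 in
theorem generate_candidate_id_py_spec : Claim_equal_generate_candidate_id_py := by
  intro name position _
  unfold Spec_generate_candidate_id_py
  show generate_candidate_id_py name position = generate_candidate_id_py_alt name position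
  unfold generate_candidate_id_py generate_candidate_id_py_alt
  rw [pv_foldl_scan name.toList [] true]
  simp only [List.nil_append]
  apply String.toList_inj.mp
  have hinit := pv_initials_eq name
  set pos := PySem.Chars.lower position.toList with hpos
  have hmem : ∀ x : String, (x ∈ (PySem.List.pyRange 0 pos.length).foldl
      (fun s i => pvKeywords.foldl
        (fun s p =>
          if PySem.List.slice pos (some i) (some (i + p.1.length)) = p.1
          then PySem.Set.add s p.2 else s) s) PySem.Set.empty)
      ↔ ∃ p ∈ pvKeywords, PySem.Chars.isIn p.1 pos = true ∧ p.2 = x := by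
    intro x
    rw [pv_mem_found]
    simp only [PySem.Set.empty, List.not_mem_nil, false_or]
    constructor
    · rintro ⟨i, hi, p, hp, hc, he⟩
      refine ⟨p, hp, ?_, he⟩
      have hne : p.1 ≠ [] := by
        fin_cases hp <;> simp
      exact (pv_found_iff_isIn pos p.1 hne).mp ⟨i, hi, hc⟩
    · rintro ⟨p, hp, hin, he⟩
      have hne : p.1 ≠ [] := by
        fin_cases hp <;> simp
      obtain ⟨i, hi, hc⟩ := (pv_found_iff_isIn pos p.1 hne).mpr hin
      exact ⟨i, hi, p, hp, hc, he⟩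
  have hSE : ("SE" ∈ (PySem.List.pyRange 0 pos.length).foldl
      (fun s i => pvKeywords.foldl
        (fun s p =>
          if PySem.List.slice pos (some i) (some (i + p.1.length)) = p.1
          then PySem.Set.add s p.2 else s) s) PySem.Set.empty)
      ↔ (PySem.Chars.isIn "software".toList pos = true
          ∨ PySem.Chars.isIn "engineer".toList pos = true) := by
    rw [hmem]; simp [pvKeywords]
  have hDS : ("DS" ∈ (PySem.List.pyRange 0 pos.length).foldl
      (fun s i => pvKeywords.foldl
        (fun s p =>
          if PySem.List.slice pos (some i) (some (i + p.1.length)) = p.1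
          then PySem.Set.add s p.2 else s) s) PySem.Set.empty)
      ↔ PySem.Chars.isIn "data".toList pos = true := by
    rw [hmem]; simp [pvKeywords]
  have hPM : ("PM" ∈ (PySem.List.pyRange 0 pos.length).foldl
      (fun s i => pvKeywords.foldl
        (fun s p =>
          if PySem.List.slice pos (some i) (some (i + p.1.length)) = p.1
          then PySem.Set.add s p.2 else s) s) PySem.Set.empty)
      ↔ PySem.Chars.isIn "product".toList pos = true := by
    rw [hmem]; simp [pvKeywords]
  have hDES : ("DES" ∈ (PySem.List.pyRange 0 pos.length).foldl
      (fun s i => pvKeywords.foldl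
        (fun s p =>
          if PySem.List.slice pos (some i) (some (i + p.1.length)) = p.1
          then PySem.Set.add s p.2 else s) s) PySem.Set.empty)
      ↔ PySem.Chars.isIn "design".toList pos = true := by
    rw [hmem]; simp [pvKeywords]
  simp only [pvFirstIn, pvPriority]
  simp only [PySem.Str.isIn_eq, PySem.Str.toList_lower, ← hpos]
  by_cases hsw : PySem.Chars.isIn "software".toList pos = true <;>
    by_cases hen : PySem.Chars.isIn "engineer".toList pos = true <;>
    by_cases hda : PySem.Chars.isIn "data".toList pos = true <;>
    by_cases hpr : PySem.Chars.isIn "product".toList pos = true <;>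
    by_cases hde : PySem.Chars.isIn "design".toList pos = true <;>
    simp_all
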